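-- pv_equiv track=rewrite | github.com/Jamesprocode/AMT | shimon_filter.py | octave_fold
-- ===== SOURCE A (Python) =====
-- def octave_fold(notes: list[tuple], lo: int = 48, hi: int = 95) -> list[tuple]:
--     """Transpose out-of-range notes by octaves until they fall within [lo, hi]."""
--     result = []
--     for (t, dur, pitch, instr) in notes:
--         p = pitch
--         while p < lo:
--             p += 12
--         while p > hi:
--             p -= 12
--         result.append((t, dur, p, instr))
--     return result
-- ===== SOURCE B (Python) =====
-- def octave_fold(notes: list[tuple], lo: int = 48, hi: int = 95) -> list[tuple]:
--     """Transpose out-of-range notes by octaves until they fall within [lo, hi]."""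
--     def fold_pitch(pitch):
--         q = lo + (pitch - lo) % 12 if pitch < lo else pitch
--         return hi - (hi - q) % 12 if q > hi else q
--     return [(t, dur, fold_pitch(pitch), instr) for (t, dur, pitch, instr) in notes]
-- ===== Notes on version B (the rewrite author's own statement) =====
-- stated objective: faster
-- what changed: replaced the two per-note while-loops stepping by 12 with closed-form modular arithmetic (lo + (pitch-lo) % 12 to raise, hi - (hi-q) % 12 to lower, applied in the same order) and built the output as a comprehension instead of an append loop
import Mathlib
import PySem

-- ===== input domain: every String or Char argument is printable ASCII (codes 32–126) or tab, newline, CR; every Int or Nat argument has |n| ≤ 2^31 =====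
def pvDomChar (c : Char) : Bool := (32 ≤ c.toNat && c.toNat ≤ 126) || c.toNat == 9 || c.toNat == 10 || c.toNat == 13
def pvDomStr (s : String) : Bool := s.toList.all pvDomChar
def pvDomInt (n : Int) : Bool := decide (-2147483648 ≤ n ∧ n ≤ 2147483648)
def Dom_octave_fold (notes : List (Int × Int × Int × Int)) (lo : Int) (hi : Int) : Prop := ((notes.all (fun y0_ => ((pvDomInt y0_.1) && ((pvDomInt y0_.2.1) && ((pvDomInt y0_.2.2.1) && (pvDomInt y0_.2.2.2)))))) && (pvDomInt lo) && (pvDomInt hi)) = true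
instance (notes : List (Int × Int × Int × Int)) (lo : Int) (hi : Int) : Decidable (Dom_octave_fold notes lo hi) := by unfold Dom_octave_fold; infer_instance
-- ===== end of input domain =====

-- B replaces the per-note while-loops (stepping by 12) with closed-form modular
-- arithmetic applied in the same raise-then-lower order (objective: faster).

-- ===== PORT A =====
-- `while p < lo: p += 12`
def octaveUpA (lo p : Int) : Int :=
  if p < lo then octaveUpA lo (p + 12) else p
termination_by (lo - p).toNat
decreasing_by omega

-- `while p > hi: p -= 12`
def octaveDownA (hi p : Int) : Int :=
  if p > hi then octaveDownA hi (p - 12) else p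
termination_by (p - hi).toNat
decreasing_by omega

def octave_fold (notes : List (Int × Int × Int × Int)) (lo : Int) (hi : Int) : List (Int × Int × Int × Int) :=
  notes.foldl (fun result note =>
    let (t, dur, pitch, instr) := note
    let p := octaveDownA hi (octaveUpA lo pitch)
    result ++ [(t, dur, p, instr)]) []

-- ===== PORT B =====
def foldPitchB (lo hi pitch : Int) : Int :=
  let q := if pitch < lo then lo + PySem.Int.mod (pitch - lo) 12 else pitch
  if q > hi then hi - PySem.Int.mod (hi - q) 12 else q

def octave_fold_alt (notes : List (Int × Int × Int × Int)) (lo : Int) (hi : Int) : List (Int × Int × Int × Int) :=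
  notes.map (fun n => (n.1, n.2.1, foldPitchB lo hi n.2.2.1, n.2.2.2))

-- ===== PRECONDITION & SPEC =====
def Spec_octave_fold (notes : List (Int × Int × Int × Int)) (lo : Int) (hi : Int) (out : List (Int × Int × Int × Int)) : Prop := out = octave_fold_alt notes lo hi
instance (notes : List (Int × Int × Int × Int)) (lo : Int) (hi : Int) (out : List (Int × Int × Int × Int)) : Decidable (Spec_octave_fold notes lo hi out) := by unfold Spec_octave_fold; infer_instance

-- ===== CLAIM (what is proved, stated in full; the proofs are below) =====
def Claim_equal_octave_fold : Prop := ∀ (notes : List (Int × Int × Int × Int)) (lo : Int) (hi : Int), Dom_octave_fold notes lo hi → Spec_octave_fold notes lo hi (octave_fold notes lo hi)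

-- ===== LEMMAS AND PROOFS =====
theorem octaveUpA_closed (lo p : Int) :
    octaveUpA lo p = if p < lo then lo + (p - lo) % 12 else p := by
  fun_induction octaveUpA lo p with
  | case1 p hlt ih => rw [ih]; split_ifs <;> omega
  | case2 p hnlt => simp [hnlt]

theorem octaveDownA_closed (hi p : Int) :
    octaveDownA hi p = if p > hi then hi - (hi - p) % 12 else p := by
  fun_induction octaveDownA hi p with
  | case1 p hgt ih => rw [ih]; split_ifs <;> omega
  | case2 p hngt => simp [hngt]

theorem foldPitch_eq (lo hi pitch : Int) :
    octaveDownA hi (octaveUpA lo pitch) = foldPitchB lo hi pitch := by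
  have hm : ∀ a : Int, PySem.Int.mod a 12 = a % 12 :=
    fun a => PySem.Int.mod_eq_emod_of_pos (by norm_num)
  simp only [foldPitchB, hm, octaveUpA_closed, octaveDownA_closed]

theorem octave_fold_acc (notes : List (Int × Int × Int × Int)) (lo hi : Int)
    (acc : List (Int × Int × Int × Int)) :
    notes.foldl (fun result note =>
      let (t, dur, pitch, instr) := note
      let p := octaveDownA hi (octaveUpA lo pitch)
      result ++ [(t, dur, p, instr)]) acc
    = acc ++ octave_fold_alt notes lo hi := by
  induction notes generalizing acc with
  | nil => simp [octave_fold_alt]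
  | cons n ns ih =>
    obtain ⟨t, dur, pitch, instr⟩ := n
    simp only [List.foldl_cons, octave_fold_alt, List.map_cons]
    rw [ih, foldPitch_eq]
    simp [octave_fold_alt]

-- ===== VERDICT (by name: the statement is the Claim_ definition above) =====
theorem octave_fold_spec : Claim_equal_octave_fold := by
  intro notes lo hi _
  unfold Spec_octave_fold octave_fold
  simpa using octave_fold_acc notes lo hi []
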